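-- pv_equiv track=rewrite | github.com/Th0rgal/MiniProjet | utilities.py | id_max
-- ===== SOURCE A (Python) =====
-- def id_max(array):
--     id_max = 0
--     for i in range(len(array)):
--         if array[i] == -1:
--             return i
--         if array[id_max] < array[i]:
--             id_max = i
--     return id_max
-- ===== SOURCE B (Python) =====
-- def id_max(array):
--     if not array:
--         return 0
--     if -1 in array:
--         return array.index(-1)
--     return max(range(len(array)), key=array.__getitem__)
-- ===== Notes on version B (the rewrite author's own statement) =====
-- stated objective: idiomatic
-- what changed: A's single fused early-returning index loop is replaced by separate idiomatic scans: a sentinel lookup via `in`/`.index(-1)` and an argmax via `max(range(len(array)), key=array.__getitem__)` (both keep the first match / first maximal index, like A).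
import Mathlib
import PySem

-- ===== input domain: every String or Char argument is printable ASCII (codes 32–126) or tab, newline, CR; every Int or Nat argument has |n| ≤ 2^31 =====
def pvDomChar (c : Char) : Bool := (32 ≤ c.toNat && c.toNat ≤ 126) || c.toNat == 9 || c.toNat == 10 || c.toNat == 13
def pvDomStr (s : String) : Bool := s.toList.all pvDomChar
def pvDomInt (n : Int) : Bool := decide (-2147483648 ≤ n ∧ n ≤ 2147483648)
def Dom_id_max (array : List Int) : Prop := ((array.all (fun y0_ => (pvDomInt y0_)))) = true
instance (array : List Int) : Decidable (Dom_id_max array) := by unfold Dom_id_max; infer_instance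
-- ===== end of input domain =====

-- B replaces A's fused early-returning index loop by separate idiomatic scans (a `-1` lookup
-- via `in`/`.index`, then argmax via `max(range(len), key=__getitem__)`); same cost, clearer code.

-- ===== PORT A =====
-- A's for-loop with its two early/ongoing branches, as recursion on the index i
-- (im = current best index; both index accesses are in range, getD is exact there).
def idMaxLoopA (array : List Int) (im i : Nat) : Int :=
  if _h : i < array.length then
    if array.getD i 0 = -1 then (i : Int)
    else if array.getD im 0 < array.getD i 0 then idMaxLoopA array i (i + 1)
    else idMaxLoopA array im (i + 1)
  else (im : Int)
termination_by array.length - i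

def id_max (array : List Int) : Int := idMaxLoopA array 0 0

-- ===== PORT B =====
def id_max_alt (array : List Int) : Int :=
  if array = [] then 0
  else
    match PySem.List.index? array (-1 : Int) with
    | some i => (i : Int)            -- `if -1 in array: return array.index(-1)`
    | none =>                        -- `max(range(len(array)), key=array.__getitem__)`
      (PySem.List.max? (PySem.List.pyRange 0 (array.length : Int) 1)
        (fun j => PySem.List.pyGetD array j 0)).getD 0
      -- `.getD 0` only totalizes the unreachable empty-range case (array ≠ [] here)

-- ===== PRECONDITION & SPEC =====
def Spec_id_max (array : List Int) (out : Int) : Prop := out = id_max_alt array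
instance (array : List Int) (out : Int) : Decidable (Spec_id_max array out) := by unfold Spec_id_max; infer_instance

-- ===== CLAIM (what is proved, stated in full; the proofs are below) =====
def Claim_equal_id_max : Prop := ∀ (array : List Int), Dom_id_max array → Spec_id_max array (id_max array)

-- ===== LEMMAS AND PROOFS =====

-- the folding step of B's `max?` over indices, as a named function (proof helper)
def pvStep (array : List Int) (acc : Option Int) (x : Int) : Option Int :=
  match acc with
  | none => some x
  | some m => if PySem.List.pyGetD array m 0 < PySem.List.pyGetD array x 0 then some x else some m

theorem foldl_fun_congr {α β : Type} {f g : β → α → β} (h : ∀ a x, f a x = g a x) :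
    ∀ (l : List α) (init : β), List.foldl f init l = List.foldl g init l := by
  intro l
  induction l with
  | nil => intro init; rfl
  | cons x t ih => intro init; rw [List.foldl_cons, List.foldl_cons, h, ih]

-- If -1 occurs in the suffix array[i:], A's loop returns i + (index of first -1 in the suffix).
theorem idMaxLoopA_found (array : List Int) :
    ∀ fuel i im k, array.length - i ≤ fuel →
      PySem.List.index? (array.drop i) (-1 : Int) = some k →
      idMaxLoopA array im i = ((i + k : Nat) : Int) := by
  intro fuel
  induction fuel with
  | zero =>
      intro i im k hf hidx
      have hge : array.length ≤ i := by omega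
      rw [List.drop_eq_nil_of_le hge] at hidx
      simp [PySem.List.index?_eq_idxOf?] at hidx
  | succ f ih =>
      intro i im k hf hidx
      by_cases hi : i < array.length
      · rw [List.drop_eq_getElem_cons hi] at hidx
        by_cases hv : array[i] = -1
        · rw [hv, PySem.List.index?_cons_self] at hidx
          have hk : k = 0 := by simpa using hidx.symm
          rw [idMaxLoopA]
          simp [hi, List.getD_eq_getElem _ _ hi, hv, hk]
        · rw [PySem.List.index?_cons_of_ne _ hv] at hidx
          rcases Option.map_eq_some_iff.mp hidx with ⟨k', hk', hkk⟩
          have hrec1 : idMaxLoopA array i (i + 1) = (((i + 1) + k' : Nat) : Int) :=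
            ih (i + 1) i k' (by omega) hk'
          have hrec2 : idMaxLoopA array im (i + 1) = (((i + 1) + k' : Nat) : Int) :=
            ih (i + 1) im k' (by omega) hk'
          rw [idMaxLoopA]
          have hgv : array.getD i 0 = array[i] := List.getD_eq_getElem _ _ hi
          simp only [hi, dif_pos, hgv, hv, if_false]
          have : (i + 1) + k' = i + k := by omega
          rw [this] at hrec1 hrec2
          split_ifs <;> assumption
      · have hge : array.length ≤ i := by omega
        rw [List.drop_eq_nil_of_le hge] at hidx
        simp [PySem.List.index?_eq_idxOf?] at hidx

-- If -1 does not occur in array[i:], A's loop from (im, i) computes exactly what B's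
-- max?-fold computes over the remaining index range, seeded with the accumulator `some im`.
theorem idMaxLoopA_maxfold (array : List Int) :
    ∀ fuel i im, array.length - i ≤ fuel → (-1 : Int) ∉ array.drop i →
      (PySem.List.pyRange (i : Int) (array.length : Int) 1).foldl (pvStep array)
        (some ((im : Nat) : Int))
      = some (idMaxLoopA array im i) := by
  intro fuel
  induction fuel with
  | zero =>
      intro i im hf _
      have hge : array.length ≤ i := by omega
      rw [PySem.List.pyRange_one_eq_nil (by exact_mod_cast hge)]
      rw [idMaxLoopA]
      simp [Nat.not_lt.mpr hge]
  | succ f ih =>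
      intro i im hf hnm
      by_cases hi : i < array.length
      · have hmem : array[i] ∈ array.drop i := by
          rw [List.drop_eq_getElem_cons hi]; exact List.mem_cons_self
        have hv : array[i] ≠ -1 := fun h => hnm (h ▸ hmem)
        have hnm' : (-1 : Int) ∉ array.drop (i + 1) := by
          intro h
          exact hnm (by rw [List.drop_eq_getElem_cons hi]; exact List.mem_cons_of_mem _ h)
        have hgv : array.getD i 0 = array[i] := List.getD_eq_getElem _ _ hi
        have hv' : ¬ array.getD i 0 = -1 := by rw [hgv]; exact hv
        rw [PySem.List.pyRange_one_cons (by exact_mod_cast hi)]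
        rw [List.foldl_cons]
        rw [idMaxLoopA]
        simp only [hi, dif_pos, hv', if_false, pvStep, PySem.List.pyGetD_natCast]
        split_ifs with hlt
        · have := ih (i + 1) i (by omega) hnm'
          push_cast at this ⊢
          exact this
        · have := ih (i + 1) im (by omega) hnm'
          push_cast at this ⊢
          exact this
      · have hge : array.length ≤ i := by omega
        rw [PySem.List.pyRange_one_eq_nil (by exact_mod_cast hge)]
        rw [idMaxLoopA]
        simp [Nat.not_lt.mpr hge]

-- ===== VERDICT (by name: the statement is the Claim_ definition above) =====
theorem id_max_spec : Claim_equal_id_max := by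
  intro array _
  unfold Spec_id_max id_max id_max_alt
  by_cases hnil : array = []
  · subst hnil
    rw [idMaxLoopA]; simp
  · simp only [hnil, if_false]
    have hlen : 0 < array.length := List.length_pos_iff.mpr hnil
    cases hidx : PySem.List.index? array (-1 : Int) with
    | some k =>
        have := idMaxLoopA_found array array.length 0 0 k (by omega) (by simpa using hidx)
        simpa using this
    | none =>
        have hnm : (-1 : Int) ∉ array := (PySem.List.index?_eq_none_iff _ _).mp hidx
        have h0 : array.getD 0 0 = array[0] := List.getD_eq_getElem _ _ hlen
        have hv0 : array[0] ≠ -1 := fun h => hnm (h ▸ List.getElem_mem hlen)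
        -- A's first step: i = 0 neither returns nor updates im
        have hstep : idMaxLoopA array 0 0 = idMaxLoopA array 0 1 := by
          rw [idMaxLoopA]
          simp [hlen, hv0]
        -- B's max? fold over range(0, n): peel off index 0 into the accumulator
        have hrange : PySem.List.pyRange 0 (array.length : Int) 1 =
            0 :: PySem.List.pyRange 1 (array.length : Int) 1 :=
          PySem.List.pyRange_one_cons (by exact_mod_cast hlen)
        have hfold := idMaxLoopA_maxfold array array.length 1 0 (by omega)
          (by intro h; exact hnm (List.mem_of_mem_drop h))
        push_cast at hfold
        rw [PySem.List.max?]
        rw [foldl_fun_congr (g := pvStep array) (fun a x => by cases a <;> rfl)]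
        rw [hrange, List.foldl_cons]
        have hacc : pvStep array none 0 = some 0 := rfl
        rw [hacc, hfold]
        simp [hstep]
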